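-- pv_equiv track=rewrite | github.com/NickB21/FlooringCost | main.py | pdf_grab
-- ===== SOURCE A (Python) =====
-- def pdf_grab(folders_in, latest_files_in):
--     i = 0
--     pdfs = []
--     pdfs_loc = []
--     while i < len(latest_files_in):
--         if latest_files_in[i].endswith(".pdf"):
--             pdfs.append(latest_files_in[i])
--             pdfs_loc.append(i)
--             i = i + 1
--         else:
--             i = i + 1
--
--     # PDF folder retrieval
--     pdf_file = []
--     i = 0
--     while i < len(pdfs_loc):
--         pdf_file.append(folders_in[pdfs_loc[i]])
--         i = i + 1
--     return pdf_file, pdfs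
-- ===== SOURCE B (Python) =====
-- def pdf_grab(folders_in, latest_files_in):
--     pdf_file = []
--     pdfs = []
--     for i, f in enumerate(latest_files_in):
--         if f.endswith(".pdf"):
--             pdfs.append(f)
--             pdf_file.append(folders_in[i])
--     return pdf_file, pdfs
-- ===== Notes on version B (the rewrite author's own statement) =====
-- stated objective: simpler
-- what changed: One enumerate loop appends a pdf name and its folder together, replacing A's two while-loops and its intermediate index list pdfs_loc.
import Mathlib
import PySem

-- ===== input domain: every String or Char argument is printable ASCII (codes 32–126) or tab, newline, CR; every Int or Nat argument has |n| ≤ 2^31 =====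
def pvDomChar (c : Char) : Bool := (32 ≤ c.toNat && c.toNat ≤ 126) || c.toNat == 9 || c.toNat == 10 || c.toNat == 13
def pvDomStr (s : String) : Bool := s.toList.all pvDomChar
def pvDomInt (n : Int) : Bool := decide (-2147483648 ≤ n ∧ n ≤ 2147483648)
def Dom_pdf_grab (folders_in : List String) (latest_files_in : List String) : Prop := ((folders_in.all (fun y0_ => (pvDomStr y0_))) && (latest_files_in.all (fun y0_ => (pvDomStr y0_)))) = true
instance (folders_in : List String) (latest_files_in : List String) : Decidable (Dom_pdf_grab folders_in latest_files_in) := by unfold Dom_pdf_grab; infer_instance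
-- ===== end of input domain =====

-- B replaces A's two while-loops and intermediate index list by one enumerate pass (objective: simpler).


-- ===== PORT A =====
-- first while-loop: scan index i over range(len(latest_files_in)), collecting pdfs and their indices
-- (pyGetD is exact here: under Pre_ every index read is in range, matching Python's latest_files_in[i]/folders_in[j])
def pdf_grab (folders_in : List String) (latest_files_in : List String) : List String × List String :=
  let st := (PySem.List.pyRange 0 latest_files_in.length 1).foldl
    (fun (acc : List String × List Int) i =>
      if PySem.Str.endswith (PySem.List.pyGetD latest_files_in i "") ".pdf" then
        (acc.1 ++ [PySem.List.pyGetD latest_files_in i ""], acc.2 ++ [i])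
      else acc) ([], [])
  -- second while-loop: map each saved index to its folder
  let pdf_file := st.2.foldl (fun (acc : List String) j => acc ++ [PySem.List.pyGetD folders_in j ""]) []
  (pdf_file, st.1)

-- ===== PORT B =====
def pdf_grab_alt (folders_in : List String) (latest_files_in : List String) : List String × List String :=
  (PySem.List.enumerate latest_files_in).foldl
    (fun (acc : List String × List String) p =>
      if PySem.Str.endswith p.2 ".pdf" then
        (acc.1 ++ [PySem.List.pyGetD folders_in p.1 ""], acc.2 ++ [p.2])
      else acc) ([], [])

-- ===== PRECONDITION & SPEC =====
-- Pre_ excludes exactly the inputs on which A raises IndexError: a '.pdf' entry at an index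
-- with no corresponding folder (folders_in too short); B raises there too.
def Pre_pdf_grab (folders_in : List String) (latest_files_in : List String) : Prop :=
  ∀ i : Nat, (h : i < latest_files_in.length) →
    PySem.Str.endswith latest_files_in[i] ".pdf" = true → i < folders_in.length
instance (folders_in : List String) (latest_files_in : List String) : Decidable (Pre_pdf_grab folders_in latest_files_in) := by unfold Pre_pdf_grab; infer_instance
def pvWitness_pdf_grab : List String × List String := (["f1", "f2"], ["a.pdf", "b.txt"])
def Spec_pdf_grab (folders_in : List String) (latest_files_in : List String) (out : List String × List String) : Prop := out = pdf_grab_alt folders_in latest_files_in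
instance (folders_in : List String) (latest_files_in : List String) (out : List String × List String) : Decidable (Spec_pdf_grab folders_in latest_files_in out) := by unfold Spec_pdf_grab; infer_instance

-- ===== CLAIM (what is proved, stated in full; the proofs are below) =====
def Claim_equal_pdf_grab : Prop := ∀ (folders_in : List String) (latest_files_in : List String), Dom_pdf_grab folders_in latest_files_in → Pre_pdf_grab folders_in latest_files_in → Spec_pdf_grab folders_in latest_files_in (pdf_grab folders_in latest_files_in)

-- ===== LEMMAS AND PROOFS =====

-- relate A's (pdfs, index-list) fold to B's (folders, pdfs) fold, generalizing the accumulators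
theorem pv_fold_key (folders_in latest_files_in : List String) (L : List Int)
    (pd : List String) (loc : List Int) :
    ((L.foldl
        (fun (acc : List String × List Int) i =>
          if PySem.Str.endswith (PySem.List.pyGetD latest_files_in i "") ".pdf" then
            (acc.1 ++ [PySem.List.pyGetD latest_files_in i ""], acc.2 ++ [i])
          else acc) (pd, loc)).2.map (fun j => PySem.List.pyGetD folders_in j ""),
     (L.foldl
        (fun (acc : List String × List Int) i =>
          if PySem.Str.endswith (PySem.List.pyGetD latest_files_in i "") ".pdf" then
            (acc.1 ++ [PySem.List.pyGetD latest_files_in i ""], acc.2 ++ [i])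
          else acc) (pd, loc)).1) =
    (L.map (fun j => (j, PySem.List.pyGetD latest_files_in j ""))).foldl
      (fun (acc : List String × List String) (p : Int × String) =>
        if PySem.Str.endswith p.2 ".pdf" then
          (acc.1 ++ [PySem.List.pyGetD folders_in p.1 ""], acc.2 ++ [p.2])
        else acc)
      (loc.map (fun j => PySem.List.pyGetD folders_in j ""), pd) := by
  induction L generalizing pd loc with
  | nil => simp
  | cons j L ih =>
    simp only [List.foldl_cons, List.map_cons]
    split_ifs with h
    · simpa [List.map_append] using
        ih (pd ++ [PySem.List.pyGetD latest_files_in j ""]) (loc ++ [j])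
    · exact ih pd loc

theorem pdf_grab_spec : Claim_equal_pdf_grab := by
  intro folders_in latest_files_in _ _
  show pdf_grab _ _ = pdf_grab_alt _ _
  unfold pdf_grab pdf_grab_alt
  simp only [PySem.List.enumerate_eq_map_pyRange (d := ""),
    PySem.List.foldl_append_singleton_eq_map, PySem.List.len]
  exact pv_fold_key folders_in latest_files_in _ [] []
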